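-- pv_equiv track=rewrite | github.com/lovepettersson/LogicalFusions | testing.py | extract_first_weigth_coeff_erasure_new
-- ===== SOURCE A (Python) =====
-- def extract_first_weigth_coeff_erasure_new(coeff, numb_qubit=1):
--     XZ_meas = {"X": 0,"Z": 0}
--     for i in range(len(coeff[''])):
--         if i == 0:
--             XZ_meas["Z"] += 1
--         else:
--             XZ_meas["X"] += 1
--     return XZ_meas
-- ===== SOURCE B (Python) =====
-- def extract_first_weigth_coeff_erasure_new(coeff, numb_qubit=1):
--     n = len(coeff[''])
--     return {"X": max(n - 1, 0), "Z": 1 if n else 0}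
-- ===== Notes on version B (the rewrite author's own statement) =====
-- stated objective: simpler
-- what changed: The per-index loop with its first-iteration branch is replaced by a closed-form dict built from the length n of the list under the empty-string key: X = max(n-1, 0), Z = 1 if n else 0.
import Mathlib
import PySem

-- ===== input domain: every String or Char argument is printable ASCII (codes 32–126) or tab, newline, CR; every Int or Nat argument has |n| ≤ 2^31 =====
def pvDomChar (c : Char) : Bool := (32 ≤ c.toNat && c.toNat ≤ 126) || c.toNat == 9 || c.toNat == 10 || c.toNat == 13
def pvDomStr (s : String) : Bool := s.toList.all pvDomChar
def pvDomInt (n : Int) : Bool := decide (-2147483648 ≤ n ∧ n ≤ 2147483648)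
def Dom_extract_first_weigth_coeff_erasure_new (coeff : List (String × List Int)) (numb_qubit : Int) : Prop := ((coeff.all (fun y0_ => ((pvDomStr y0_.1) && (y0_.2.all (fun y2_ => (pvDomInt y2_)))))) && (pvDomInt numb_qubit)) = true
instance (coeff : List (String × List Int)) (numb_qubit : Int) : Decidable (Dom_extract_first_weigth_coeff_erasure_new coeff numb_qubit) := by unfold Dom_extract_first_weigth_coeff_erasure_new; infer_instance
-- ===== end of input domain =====

-- B replaces A's per-index loop with the i==0 branch by a closed-form dict computed
-- from n = len(coeff['']): X = max(n-1, 0), Z = 1 if n else 0 (simpler, no loop).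

-- ===== PORT A =====
def extract_first_weigth_coeff_erasure_new (coeff : List (String × List Int)) (numb_qubit : Int) : List (String × Int) :=
  match List.lookup "" coeff with
  | none => []   -- the empty-string key is missing: Python raises KeyError, excluded by Pre_
  | some xs =>
      let XZ_meas : PySem.Dict String Int := PySem.Dict.ofList [("X", 0), ("Z", 0)]
      let final := (PySem.List.pyRange 0 (xs.length : Int) 1).foldl
        (fun d i => if i == 0 then d.modify "Z" 0 (· + 1) else d.modify "X" 0 (· + 1)) XZ_meas
      final.items

-- ===== PORT B =====
def extract_first_weigth_coeff_erasure_new_alt (coeff : List (String × List Int)) (numb_qubit : Int) : List (String × Int) :=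
  match List.lookup "" coeff with
  | none => []   -- the empty-string key is missing: Python raises KeyError, excluded by Pre_
  | some xs =>
      [("X", max ((xs.length : Int) - 1) 0), ("Z", if xs.length = 0 then 0 else 1)]

-- ===== PRECONDITION & SPEC =====
-- Pre_: the empty-string key is present in coeff; otherwise the Python A raises KeyError.
def Pre_extract_first_weigth_coeff_erasure_new (coeff : List (String × List Int)) (numb_qubit : Int) : Prop :=
  "" ∈ coeff.map Prod.fst
instance (coeff : List (String × List Int)) (numb_qubit : Int) : Decidable (Pre_extract_first_weigth_coeff_erasure_new coeff numb_qubit) := by unfold Pre_extract_first_weigth_coeff_erasure_new; infer_instance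
def pvWitness_extract_first_weigth_coeff_erasure_new : (List (String × List Int)) × Int := ([("", [3, 4, 5])], 1)

def Spec_extract_first_weigth_coeff_erasure_new (coeff : List (String × List Int)) (numb_qubit : Int) (out : List (String × Int)) : Prop := out = extract_first_weigth_coeff_erasure_new_alt coeff numb_qubit
instance (coeff : List (String × List Int)) (numb_qubit : Int) (out : List (String × Int)) : Decidable (Spec_extract_first_weigth_coeff_erasure_new coeff numb_qubit out) := by unfold Spec_extract_first_weigth_coeff_erasure_new; infer_instance

-- ===== CLAIM (what is proved, stated in full; the proofs are below) =====
def Claim_equal_extract_first_weigth_coeff_erasure_new : Prop := ∀ (coeff : List (String × List Int)) (numb_qubit : Int), Dom_extract_first_weigth_coeff_erasure_new coeff numb_qubit → Pre_extract_first_weigth_coeff_erasure_new coeff numb_qubit → Spec_extract_first_weigth_coeff_erasure_new coeff numb_qubit (extract_first_weigth_coeff_erasure_new coeff numb_qubit)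

-- ===== LEMMAS AND PROOFS =====

-- Under Pre_ the lookup of the empty-string key succeeds.
lemma pv_lookup_isSome (l : List (String × List Int)) (h : "" ∈ l.map Prod.fst) :
    (List.lookup "" l).isSome := by
  induction l with
  | nil => simp at h
  | cons p t ih =>
    rw [List.map_cons, List.mem_cons] at h
    match p with
    | (k, v) =>
      rw [List.lookup_cons]
      by_cases hp : k = ""
      · simp [hp]
      · have hb : ("" == k) = false := beq_eq_false_iff_ne.mpr (fun e => hp e.symm)
        rw [hb]
        exact ih (h.resolve_left (fun e => hp e.symm))

-- The loop of A, after n iterations, holds exactly B's closed form.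
lemma pv_loop_closed (n : Nat) :
    (PySem.List.pyRange 0 (n : Int) 1).foldl
        (fun d i => if i == 0 then PySem.Dict.modify d "Z" 0 (· + 1)
                    else PySem.Dict.modify d "X" 0 (· + 1))
        (PySem.Dict.ofList [("X", 0), ("Z", 0)]) =
      PySem.Dict.mk [("X", max ((n : Int) - 1) 0), ("Z", if n = 0 then 0 else 1)] := by
  induction n with
  | zero => decide
  | succ k ih =>
      rw [show ((k + 1 : Nat) : Int) = (k : Int) + 1 by push_cast; ring,
          PySem.List.pyRange_one_succ_right (by positivity), List.foldl_append, ih]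
      cases k with
      | zero => decide
      | succ m =>
          have hne : (((m + 1 : Nat) : Int) == 0) = false := by
            simp only [beq_eq_false_iff_ne, ne_eq]
            omega
          simp only [List.foldl_cons, List.foldl_nil, hne, Bool.false_eq_true, if_false]
          apply PySem.Dict.ext
          simp [PySem.Dict.modify, PySem.Dict.insert, PySem.Dict.getD, PySem.Dict.get?,
                PySem.Dict.contains]
          omega

-- ===== VERDICT (by name: the statement is the Claim_ definition above) =====
theorem extract_first_weigth_coeff_erasure_new_spec : Claim_equal_extract_first_weigth_coeff_erasure_new := by
  intro coeff numb_qubit _ hpre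
  unfold Spec_extract_first_weigth_coeff_erasure_new
  unfold extract_first_weigth_coeff_erasure_new extract_first_weigth_coeff_erasure_new_alt
  cases h : List.lookup "" coeff with
  | none => exact absurd (pv_lookup_isSome coeff hpre) (by simp [h])
  | some xs =>
      simp only [pv_loop_closed xs.length]
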